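-- pv_equiv track=rewrite | github.com/olegkhachumov/Stego | stego/rm.py | make_equation
-- ===== SOURCE A (Python) =====
-- def make_equation(checkMatrix):
-- 	#работает в паре с функцией solve
-- 	#выдает необходимые соотношения для нахождения вектора q по синдрому s: q*H^t = s
-- 	equation = {}
-- 	for i in range(0, len(checkMatrix)):
-- 		equation.update({checkMatrix[i][0]:[i]})
-- 	for i in range(len(checkMatrix)-1, 0, -1):
-- 		for j in range(i-1, -1, -1):
-- 			if(checkMatrix[i][0] in checkMatrix[j]):
-- 				equation[checkMatrix[j][0]].append(i)
-- 	return equation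
-- ===== SOURCE B (Python) =====
-- def make_equation(checkMatrix):
--     # inverted index value -> ascending list of row indices containing it
--     index = {}
--     for j, row in enumerate(checkMatrix):
--         for v in dict.fromkeys(row):
--             index.setdefault(v, []).append(j)
--     equation = {}
--     for i, row in enumerate(checkMatrix):
--         equation[row[0]] = [i]
--     for i in range(len(checkMatrix) - 1, 0, -1):
--         for j in reversed([j for j in index.get(checkMatrix[i][0], []) if j < i]):
--             equation[checkMatrix[j][0]].append(i)
--     return equation
-- ===== Notes on version B (the rewrite author's own statement) =====
-- stated objective: faster
-- what changed: Replaces A's all-pairs scan (for each pair i>j, test whether row i's head occurs in row j by a linear membership scan) with an inverted index value->ascending row indices built in one pass, so each i only visits the rows actually containing its head.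
import Mathlib
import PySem

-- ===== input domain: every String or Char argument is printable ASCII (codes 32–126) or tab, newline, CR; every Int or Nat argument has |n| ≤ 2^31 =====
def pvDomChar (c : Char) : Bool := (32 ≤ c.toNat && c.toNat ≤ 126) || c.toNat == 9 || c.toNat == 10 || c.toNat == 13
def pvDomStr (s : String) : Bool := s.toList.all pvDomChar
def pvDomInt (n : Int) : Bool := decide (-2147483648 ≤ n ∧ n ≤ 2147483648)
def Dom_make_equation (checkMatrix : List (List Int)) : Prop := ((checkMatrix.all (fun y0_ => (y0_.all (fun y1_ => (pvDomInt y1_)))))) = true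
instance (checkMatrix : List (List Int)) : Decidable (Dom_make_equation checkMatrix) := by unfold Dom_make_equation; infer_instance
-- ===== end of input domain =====

-- B replaces A's all-pairs row scan by an inverted index value -> row indices, built once; same dict result.

-- ===== PORT A =====
-- literal port of Source A: pass 1 inserts {row[i][0]: [i]}; pass 2 scans all pairs i > j.
def make_equation (checkMatrix : List (List Int)) : List (Int × List Int) :=
  let eq0 : PySem.Dict Int (List Int) :=
    (PySem.List.pyRange 0 (PySem.List.len checkMatrix) 1).foldl
      (fun d i => d.insert (PySem.List.pyGetD (PySem.List.pyGetD checkMatrix i []) 0 0) [i])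
      PySem.Dict.empty
  let eq1 :=
    (PySem.List.pyRange (PySem.List.len checkMatrix - 1) 0 (-1)).foldl
      (fun d i =>
        (PySem.List.pyRange (i - 1) (-1) (-1)).foldl
          (fun d j =>
            if (PySem.List.pyGetD checkMatrix j []).contains
                 (PySem.List.pyGetD (PySem.List.pyGetD checkMatrix i []) 0 0) then
              d.modify (PySem.List.pyGetD (PySem.List.pyGetD checkMatrix j []) 0 0) []
                (fun l => l ++ [i])
            else d)
          d)
      eq0
  eq1.items

-- ===== PORT B =====
-- literal port of Source B: inverted index (dict.fromkeys = PySem.List.dedup), then lookups instead of scans.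
def make_equation_alt (checkMatrix : List (List Int)) : List (Int × List Int) :=
  let index : PySem.Dict Int (List Int) :=
    (PySem.List.enumerate checkMatrix).foldl
      (fun ix p => (PySem.List.dedup p.2).foldl
        (fun ix v => ix.modify v [] (fun l => l ++ [p.1])) ix)
      PySem.Dict.empty
  let eq0 : PySem.Dict Int (List Int) :=
    (PySem.List.enumerate checkMatrix).foldl
      (fun d p => d.insert (PySem.List.pyGetD p.2 0 0) [p.1])
      PySem.Dict.empty
  let eq1 :=
    (PySem.List.pyRange (PySem.List.len checkMatrix - 1) 0 (-1)).foldl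
      (fun d i =>
        (((index.getD (PySem.List.pyGetD (PySem.List.pyGetD checkMatrix i []) 0 0) []).filter
            (fun j => decide (j < i))).reverse).foldl
          (fun d j =>
            d.modify (PySem.List.pyGetD (PySem.List.pyGetD checkMatrix j []) 0 0) []
              (fun l => l ++ [i]))
          d)
      eq0
  eq1.items

-- ===== PRECONDITION & SPEC =====
-- Pre_ excludes matrices containing an empty row, on which Python A raises IndexError (checkMatrix[i][0]).
def Pre_make_equation (checkMatrix : List (List Int)) : Prop :=
  ∀ row ∈ checkMatrix, row ≠ []
instance (checkMatrix : List (List Int)) : Decidable (Pre_make_equation checkMatrix) := by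
  unfold Pre_make_equation; infer_instance
def pvWitness_make_equation : List (List Int) := [[1, 2], [2, 3], [3, 1]]

def Spec_make_equation (checkMatrix : List (List Int)) (out : List (Int × List Int)) : Prop :=
  out = make_equation_alt checkMatrix
instance (checkMatrix : List (List Int)) (out : List (Int × List Int)) :
    Decidable (Spec_make_equation checkMatrix out) := by unfold Spec_make_equation; infer_instance

-- ===== CLAIM (what is proved, stated in full; the proofs are below) =====
def Claim_equal_make_equation : Prop :=
  ∀ (checkMatrix : List (List Int)), Dom_make_equation checkMatrix →
    Pre_make_equation checkMatrix →
    Spec_make_equation checkMatrix (make_equation checkMatrix)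

-- ===== LEMMAS AND PROOFS =====

-- filter of a nodup list by equality with v
lemma filter_beq_nodup {l : List Int} (h : l.Nodup) (v : Int) :
    l.filter (fun x => x == v) = if v ∈ l then [v] else [] := by
  rw [List.filter_beq]
  by_cases hv : v ∈ l
  · simp [List.count_eq_one_of_mem h hv, hv]
  · simp [List.count_eq_zero_of_not_mem hv, hv]

-- inner index-building loop: one row contributes its index j once per distinct value
lemma index_row_step (row : List Int) (j : Int) (ix : PySem.Dict Int (List Int)) (v : Int) :
    ((PySem.List.dedup row).foldl (fun ix v' => ix.modify v' [] (fun l => l ++ [j])) ix).getD v []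
      = ix.getD v [] ++ (if v ∈ row then [j] else []) := by
  have h1 : (PySem.List.dedup row).foldl (fun ix v' => ix.modify v' [] (fun l => l ++ [j])) ix
      = ((PySem.List.dedup row).map (fun v' => (v', j))).foldl
          (fun ix p => ix.modify p.1 [] (fun l => l ++ [p.2])) ix := by
    rw [List.foldl_map]
  rw [h1, PySem.Dict.getD_foldl_modify_append, List.filter_map]
  have h2 : ((fun p => p.1 == v) ∘ (fun v' => (v', j))) = (fun x => x == v) := rfl
  simp only [PySem.List.dedup] at *
  rw [h2, filter_beq_nodup (PySem.Set.nodup_ofList row) v]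
  by_cases hv : v ∈ row
  · simp [(PySem.Set.mem_ofList row v).2 hv, hv]
  · simp [hv]

-- the inverted index over any index list js
lemma index_foldl_getD (m : List (List Int)) (js : List Int) (d : PySem.Dict Int (List Int)) (v : Int) :
    (js.foldl (fun ix j => (PySem.List.dedup (PySem.List.pyGetD m j [])).foldl
        (fun ix v' => ix.modify v' [] (fun l => l ++ [j])) ix) d).getD v []
      = d.getD v [] ++ js.filter (fun j => (PySem.List.pyGetD m j []).contains v) := by
  induction js generalizing d with
  | nil => simp
  | cons j js ih =>
    simp only [List.foldl_cons, List.filter_cons]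
    rw [ih, index_row_step]
    by_cases hv : v ∈ PySem.List.pyGetD m j []
    · simp [hv]
    · simp [hv]

-- ascending range split at i
lemma filter_lt_pyRange (n i : Int) (h0 : 0 ≤ i) (h1 : i ≤ n) :
    (PySem.List.pyRange 0 n 1).filter (fun j => decide (j < i)) = PySem.List.pyRange 0 i 1 := by
  rw [PySem.List.pyRange_one_append 0 i n h0 h1, List.filter_append]
  have ha : (PySem.List.pyRange 0 i 1).filter (fun j => decide (j < i)) = PySem.List.pyRange 0 i 1 := by
    apply List.filter_eq_self.2
    intro x hx
    simp [(PySem.List.mem_pyRange_one.1 hx).2]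
  have hb : (PySem.List.pyRange i n 1).filter (fun j => decide (j < i)) = [] := by
    apply List.filter_eq_nil_iff.2
    intro x hx
    simp [(PySem.List.mem_pyRange_one.1 hx).1, not_lt.2]
  rw [ha, hb, List.append_nil]

theorem make_equation_spec : Claim_equal_make_equation := by
  intro m _ _
  show make_equation m = make_equation_alt m
  unfold make_equation make_equation_alt
  rw [PySem.List.enumerate_eq_map_pyRange m ([] : List Int)]
  rw [List.foldl_map, List.foldl_map]
  simp only []
  congr 1
  apply PySem.List.foldl_congr_mem
  intro acc i hi
  obtain ⟨hi1, hi2⟩ := PySem.List.mem_pyRange_neg_one.1 hi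
  rw [index_foldl_getD]
  rw [PySem.Dict.getD_empty, List.nil_append]
  set h := PySem.List.pyGetD (PySem.List.pyGetD m i []) 0 0 with hh
  set p : Int → Bool := fun j => (PySem.List.pyGetD m j []).contains h with hp
  set f : PySem.Dict Int (List Int) → Int → PySem.Dict Int (List Int) :=
    fun d j => d.modify (PySem.List.pyGetD (PySem.List.pyGetD m j []) 0 0) [] (fun l => l ++ [i]) with hf
  have hA : List.foldl (fun d j => if p j = true then f d j else d) acc
      (PySem.List.pyRange (i - 1) (-1) (-1))
      = List.foldl f acc ((PySem.List.pyRange (i - 1) (-1) (-1)).filter p) :=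
    (List.foldl_filter).symm
  rw [hA]
  congr 1
  have hrev : PySem.List.pyRange (i - 1) (-1) (-1) = (PySem.List.pyRange 0 i 1).reverse := by
    rw [PySem.List.pyRange_neg_one_eq_reverse]
    norm_num
  rw [hrev, List.filter_reverse, List.filter_comm,
      filter_lt_pyRange (PySem.List.len m) i (le_of_lt hi1) (by omega)]
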